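-- pv_equiv track=rewrite | github.com/uio-bmi/immuneML | source/IO/dataset_import/GenericLoader.py | _prepare_custom_params
-- ===== SOURCE A (Python) =====
-- def _prepare_custom_params(params: list) -> dict:
--     custom_params = {}
--     for p in params:
--         for key in p.keys():
--             if key in custom_params:
--                 custom_params[key].add(tuple(p[key]))
--             else:
--                 custom_params[key] = {tuple(p[key])}
--
--     return custom_params
-- ===== SOURCE B (Python) =====
-- def _prepare_custom_params(params: list) -> dict:
--     keys = dict.fromkeys(k for p in params for k in p)
--     return {k: {tuple(p[k]) for p in params if k in p} for k in keys}
-- ===== Notes on version B (the rewrite author's own statement) =====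
-- stated objective: idiomatic
-- what changed: Replaces the incremental dict-of-sets loop by first collecting the key order with dict.fromkeys and then building the whole result as one dict comprehension whose values are set comprehensions scanning params per key.
import Mathlib
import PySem

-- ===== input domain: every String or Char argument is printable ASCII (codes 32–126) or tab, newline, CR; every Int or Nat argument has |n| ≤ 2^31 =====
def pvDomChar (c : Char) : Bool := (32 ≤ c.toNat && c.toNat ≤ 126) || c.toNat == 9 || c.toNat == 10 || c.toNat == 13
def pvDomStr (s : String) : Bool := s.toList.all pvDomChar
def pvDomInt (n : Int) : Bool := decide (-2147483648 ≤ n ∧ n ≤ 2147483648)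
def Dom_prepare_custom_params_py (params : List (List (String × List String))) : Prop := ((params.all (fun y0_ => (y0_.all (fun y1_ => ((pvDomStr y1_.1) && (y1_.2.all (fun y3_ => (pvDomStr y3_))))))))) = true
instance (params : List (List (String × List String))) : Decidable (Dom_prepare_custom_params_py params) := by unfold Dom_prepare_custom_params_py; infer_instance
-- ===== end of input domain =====

-- B builds the same dict-of-sets by one comprehension per first-occurrence key instead of A's incremental loop (idiomatic restructuring, not faster).
-- ===== PORT A =====
def prepare_custom_params_py (params : List (List (String × List String))) : List (String × List (List String)) :=
  (params.foldl
    (fun custom_params p =>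
      (PySem.Dict.ofList p).keys.foldl
        (fun custom_params key =>
          if custom_params.contains key then
            custom_params.insert key
              (PySem.Set.add (custom_params.getD key []) ((PySem.Dict.ofList p).getD key []))
          else
            custom_params.insert key [(PySem.Dict.ofList p).getD key []])
        custom_params)
    PySem.Dict.empty).items

-- ===== PORT B =====
def prepare_custom_params_py_alt (params : List (List (String × List String))) : List (String × List (List String)) :=
  let keys := PySem.List.dedup (params.flatMap (fun p => (PySem.Dict.ofList p).keys))
  keys.map (fun k =>
    (k, PySem.Set.ofList (params.filterMap (fun p => (PySem.Dict.ofList p).get? k))))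

-- ===== PRECONDITION & SPEC =====
def Spec_prepare_custom_params_py (params : List (List (String × List String))) (out : List (String × List (List String))) : Prop := out = prepare_custom_params_py_alt params
instance (params : List (List (String × List String))) (out : List (String × List (List String))) : Decidable (Spec_prepare_custom_params_py params out) := by unfold Spec_prepare_custom_params_py; infer_instance

-- ===== CLAIM (what is proved, stated in full; the proofs are below) =====
def Claim_equal_prepare_custom_params_py : Prop := ∀ (params : List (List (String × List String))), Dom_prepare_custom_params_py params → Spec_prepare_custom_params_py params (prepare_custom_params_py params)

-- ===== LEMMAS AND PROOFS =====

-- A's inner loop over one dict p, as a named helper (definitionally equal to the port's inner fold)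
def pvStep (d : PySem.Dict String (List (List String))) (p : List (String × List String)) :
    PySem.Dict String (List (List String)) :=
  (PySem.Dict.ofList p).keys.foldl
    (fun custom_params key =>
      if custom_params.contains key then
        custom_params.insert key
          (PySem.Set.add (custom_params.getD key []) ((PySem.Dict.ofList p).getD key []))
      else
        custom_params.insert key [(PySem.Dict.ofList p).getD key []])
    d

theorem pvA_eq_foldl (params : List (List (String × List String))) :
    prepare_custom_params_py params = (params.foldl pvStep PySem.Dict.empty).items := rfl

-- the inner loop's body as a single insert (if pulled inside)
theorem pvStep_eq_insert (d : PySem.Dict String (List (List String))) (p : List (String × List String)) :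
    pvStep d p = (PySem.Dict.ofList p).keys.foldl
      (fun d key => d.insert key
        (if d.contains key then PySem.Set.add (d.getD key []) ((PySem.Dict.ofList p).getD key [])
         else [(PySem.Dict.ofList p).getD key []])) d := by
  unfold pvStep
  congr 1
  funext d key
  exact (apply_ite (d.insert key) _ _ _).symm

theorem pvKeys_step (d : PySem.Dict String (List (List String))) (p : List (String × List String)) :
    (pvStep d p).keys = PySem.Set.update d.keys (PySem.Dict.ofList p).keys := by
  rw [pvStep_eq_insert]
  exact PySem.Dict.keys_foldl_insert _ _ _

theorem pvNodup_step (d : PySem.Dict String (List (List String))) (p : List (String × List String))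
    (h : d.keys.Nodup) : (pvStep d p).keys.Nodup := by
  rw [pvStep_eq_insert]
  exact PySem.Dict.nodup_keys_foldl_insert _ _ _ h

-- getD through a nodup insert-loop: only the insert at k matters, computed from the incoming dict
theorem pvGetD_loop (l : List String) (v : String → List String)
    (d : PySem.Dict String (List (List String))) (k : String) (hl : l.Nodup) :
    (l.foldl (fun d key => d.insert key
        (if d.contains key then PySem.Set.add (d.getD key []) (v key) else [v key])) d).getD k []
    = if k ∈ l then (if d.contains k then PySem.Set.add (d.getD k []) (v k) else [v k])
      else d.getD k [] := by
  induction l generalizing d with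
  | nil => simp
  | cons x l ih =>
    have hx : x ∉ l := (List.nodup_cons.mp hl).1
    rw [List.foldl_cons, ih _ (List.nodup_cons.mp hl).2]
    by_cases hk : k = x
    · subst hk
      simp [hx, PySem.Dict.getD_insert_self]
    · simp only [List.mem_cons, hk, false_or]
      by_cases hkl : k ∈ l <;>
        simp [hkl, PySem.Dict.getD_insert, PySem.Dict.contains_insert, hk]

theorem pvInvariant (params : List (List (String × List String))) :
    (params.foldl pvStep PySem.Dict.empty).keys
        = PySem.Set.ofList (params.flatMap (fun p => (PySem.Dict.ofList p).keys))
    ∧ (params.foldl pvStep PySem.Dict.empty).keys.Nodup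
    ∧ ∀ k, (params.foldl pvStep PySem.Dict.empty).getD k []
        = PySem.Set.ofList (params.filterMap (fun p => (PySem.Dict.ofList p).get? k)) := by
  induction params using List.reverseRecOn with
  | nil => refine ⟨by simp [PySem.Set.ofList], by simp, fun k => by simp [PySem.Set.ofList]⟩
  | append_singleton params p ih =>
    obtain ⟨hkeys, hnd, hget⟩ := ih
    set d := params.foldl pvStep PySem.Dict.empty with hd
    have hfold : (params ++ [p]).foldl pvStep PySem.Dict.empty = pvStep d p := by
      rw [List.foldl_append]; rfl
    refine ⟨?_, ?_, ?_⟩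
    · rw [hfold, pvKeys_step, hkeys, List.flatMap_append]
      simp [PySem.Set.ofList_append]
    · rw [hfold]; exact pvNodup_step _ _ hnd
    · intro k
      rw [hfold, pvStep_eq_insert, pvGetD_loop _ _ _ _ (PySem.Dict.nodup_keys_ofList p),
        List.filterMap_append, hget]
      by_cases hmem : k ∈ (PySem.Dict.ofList p).keys
      · have hsome : (PySem.Dict.ofList p).get? k = some ((PySem.Dict.ofList p).getD k []) := by
          have hc' : (PySem.Dict.ofList p).contains k = true :=
            (PySem.Dict.contains_iff_mem_keys _ _).mpr hmem
          have hiss : ((PySem.Dict.ofList p).get? k).isSome := by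
            rw [← PySem.Dict.contains_eq_isSome_get?]; exact hc'
          rcases Option.isSome_iff_exists.mp hiss with ⟨w, hw⟩
          rw [hw, PySem.Dict.getD_of_get?_eq_some _ _ hw]
        by_cases hc : d.contains k = true
        · simp [hmem, hc, hsome, PySem.Set.ofList_append_singleton]
        · have hknot : k ∉ d.keys := fun hm =>
            hc ((PySem.Dict.contains_iff_mem_keys _ _).mpr hm)
          rw [hkeys] at hknot
          have hnil : params.filterMap (fun p => (PySem.Dict.ofList p).get? k) = [] := by
            rw [List.filterMap_eq_nil_iff]
            intro q hq
            rw [PySem.Dict.get?_eq_none_iff_not_mem_keys]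
            intro hkq
            exact hknot ((PySem.Set.mem_ofList _ _).mpr (List.mem_flatMap.mpr ⟨q, hq, hkq⟩))
          simp [hmem, hc, hsome, hnil, PySem.Set.ofList]
      · have hnone : (PySem.Dict.ofList p).get? k = none := by
          rw [PySem.Dict.get?_eq_none_iff_not_mem_keys]; exact hmem
        simp [hmem, hnone]

-- ===== VERDICT (by name: the statement is the Claim_ definition above) =====
theorem prepare_custom_params_py_spec : Claim_equal_prepare_custom_params_py := by
  intro params _
  unfold Spec_prepare_custom_params_py prepare_custom_params_py_alt
  obtain ⟨hkeys, hnd, hget⟩ := pvInvariant params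
  rw [pvA_eq_foldl, PySem.Dict.items_eq_map_keys _ hnd [], hkeys]
  simp only [PySem.List.dedup_eq_ofList]
  exact List.map_congr_left fun k _ => by rw [hget k]
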